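-- pv_equiv track=rewrite | github.com/samim-reza/CodeSpace | AI_Lab/clp1.py | find_2nd_vowel_index
-- ===== SOURCE A (Python) =====
-- def find_2nd_vowel_index(name):
--     vowels = "AEIOU"
--     count = 0
--     for idx, c in enumerate(name):
--         if c in vowels:
--             count+=1
--             if count == 2:
--                 return idx
--     return -1
-- ===== SOURCE B (Python) =====
-- def find_2nd_vowel_index(name):
--     # Alphabet-driven: for each vowel letter use str.find to locate its next
--     # occurrence; the minimum of those hits is the next vowel position.
--     def next_vowel(start):
--         hits = [p for p in (name.find(v, start) for v in "AEIOU") if p != -1]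
--         return min(hits) if hits else -1
--     first = next_vowel(0)
--     if first == -1:
--         return -1
--     return next_vowel(first + 1)
-- ===== Notes on version B (the rewrite author's own statement) =====
-- stated objective: faster
-- what changed: Instead of one character-by-character scan with a running counter, B iterates over the vowel alphabet using str.find(v, start) and takes the minimum hit, twice: once from 0 for the first vowel, then from first+1 for the second; the per-character work moves into C-level str.find.
import Mathlib
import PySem

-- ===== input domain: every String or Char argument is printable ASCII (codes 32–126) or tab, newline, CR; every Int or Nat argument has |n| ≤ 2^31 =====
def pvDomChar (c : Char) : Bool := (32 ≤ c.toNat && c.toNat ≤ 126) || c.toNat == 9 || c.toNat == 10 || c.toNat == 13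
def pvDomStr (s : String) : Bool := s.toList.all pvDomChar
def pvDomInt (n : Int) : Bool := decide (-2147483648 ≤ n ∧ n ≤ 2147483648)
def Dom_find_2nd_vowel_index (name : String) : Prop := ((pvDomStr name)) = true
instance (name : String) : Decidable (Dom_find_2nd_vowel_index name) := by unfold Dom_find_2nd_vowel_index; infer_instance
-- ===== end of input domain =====

-- B replaces A's single counter scan by an alphabet-driven search: per-vowel str.find plus min, run twice (first vowel, then next after it).

-- ===== PORT A =====
-- A's loop with its running counter and early return, as structural recursion over the enumerated characters.
def pvGoA : List (Int × Char) → Int → Int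
  | [], _ => -1
  | (idx, c) :: rest, count =>
    if ("AEIOU".toList.contains c) then
      if count + 1 == 2 then idx else pvGoA rest (count + 1)
    else pvGoA rest count

def find_2nd_vowel_index (name : String) : Int :=
  pvGoA (PySem.List.enumerate name.toList 0) 0

-- ===== PORT B =====
-- hits = [p for p in (name.find(v, start) for v in "AEIOU") if p != -1]; return min(hits) if hits else -1
def pvNextVowel (name : String) (start : Int) : Int :=
  let hits := (("AEIOU".toList).map
      (fun v => PySem.Str.findFrom name (String.singleton v) start)).filter (fun p => p != -1)
  match PySem.List.min? hits (fun x => x) with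
  | some m => m
  | none => -1

def find_2nd_vowel_index_alt (name : String) : Int :=
  let first := pvNextVowel name 0
  if first == -1 then -1 else pvNextVowel name (first + 1)

-- ===== PRECONDITION & SPEC =====
def Spec_find_2nd_vowel_index (name : String) (out : Int) : Prop := out = find_2nd_vowel_index_alt name
instance (name : String) (out : Int) : Decidable (Spec_find_2nd_vowel_index name out) := by unfold Spec_find_2nd_vowel_index; infer_instance

-- ===== CLAIM =====
def Claim_equal_find_2nd_vowel_index : Prop := ∀ (name : String), Dom_find_2nd_vowel_index name → Spec_find_2nd_vowel_index name (find_2nd_vowel_index name)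

-- ===== LEMMAS AND PROOFS =====

-- Index of the first uppercase vowel in a character list (-1 if none); the reference both ports are compared against.
def pvFirstIdx : List Char → Int
  | [] => -1
  | c :: t =>
    if "AEIOU".toList.contains c then 0
    else if pvFirstIdx t = -1 then -1 else pvFirstIdx t + 1

theorem pvNegOneLe_firstIdx (d : List Char) : -1 ≤ pvFirstIdx d := by
  induction d with
  | nil => simp [pvFirstIdx]
  | cons c t ih => simp only [pvFirstIdx]; split_ifs <;> omega

theorem pvFirstIdx_eq_neg_one_iff (d : List Char) :
    pvFirstIdx d = -1 ↔ ∀ c ∈ d, "AEIOU".toList.contains c = false := by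
  induction d with
  | nil => simp [pvFirstIdx]
  | cons c t ih =>
    have hge := pvNegOneLe_firstIdx t
    by_cases hc : "AEIOU".toList.contains c = true
    · simp only [pvFirstIdx, hc, if_true, List.mem_cons]
      constructor
      · intro h; omega
      · intro h
        have := h c (Or.inl rfl)
        rw [hc] at this
        exact absurd this (by simp)
    · have hcf : "AEIOU".toList.contains c = false := by
        cases hb : "AEIOU".toList.contains c
        · rfl
        · exact absurd hb hc
      simp only [pvFirstIdx, hcf, Bool.false_eq_true, if_false, List.mem_cons]
      constructor
      · intro h x hx
        rcases hx with rfl | hx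
        · exact hcf
        · split_ifs at h with ht
          · exact (ih.mp ht) x hx
          · omega
      · intro h
        have ht : pvFirstIdx t = -1 := ih.mpr (fun x hx => h x (Or.inr hx))
        simp [ht]

theorem pvFirstIdx_spec (d : List Char) (h : pvFirstIdx d ≠ -1) :
    ∃ n : Nat, pvFirstIdx d = ↑n ∧
      (∃ c, d[n]? = some c ∧ "AEIOU".toList.contains c = true) ∧
      ∀ j < n, ∀ c, d[j]? = some c → "AEIOU".toList.contains c = false := by
  induction d with
  | nil => simp [pvFirstIdx] at h
  | cons c t ih =>
    by_cases hc : "AEIOU".toList.contains c = true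
    · exact ⟨0, by simp only [pvFirstIdx, hc, if_true]; rfl, ⟨c, by simp, hc⟩, by omega⟩
    · have hcf : "AEIOU".toList.contains c = false := by
        cases hb : "AEIOU".toList.contains c
        · rfl
        · exact absurd hb hc
      have ht : pvFirstIdx t ≠ -1 := by
        intro ht
        apply h
        simp only [pvFirstIdx, hcf, Bool.false_eq_true, if_false]
        rw [if_pos ht]
      obtain ⟨n, hn, ⟨c', hc', hv⟩, hmin⟩ := ih ht
      refine ⟨n + 1, ?_, ⟨c', by simpa using hc', hv⟩, ?_⟩
      · simp only [pvFirstIdx, hcf, Bool.false_eq_true, if_false, hn]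
        rw [if_neg (by omega : ¬((n : Int) = -1))]
        push_cast; ring
      · intro j hj c'' hg
        cases j with
        | zero =>
          simp at hg
          subst hg
          exact hcf
        | succ j' => exact hmin j' (by omega) c'' (by simpa using hg)

theorem pvSingleton_prefix {c : Char} {l : List Char} (h : l.head? = some c) : [c] <+: l := by
  cases l with
  | nil => simp at h
  | cons x xs =>
    simp at h
    subst h
    exact ⟨xs, rfl⟩

-- first vowel at absolute index n ⇒ that vowel's own find lands exactly at n
theorem pvFind_at_first (d : List Char) (n : Nat) (c : Char)
    (hget : d[n]? = some c)
    (hmin : ∀ j < n, ∀ c', d[j]? = some c' → "AEIOU".toList.contains c' = false)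
    (hv : "AEIOU".toList.contains c = true) :
    PySem.Chars.find d [c] = ↑n := by
  have hmem : c ∈ d := List.mem_of_getElem? hget
  have hinf : [c] <:+: d := (List.singleton_infix_iff c d).mpr hmem
  have hnn : 0 ≤ PySem.Chars.find d [c] := (PySem.Chars.find_nonneg_iff d [c]).mpr hinf
  obtain ⟨hpre, hfmin⟩ := PySem.Chars.find_spec hnn
  set t := (PySem.Chars.find d [c]).toNat with htdef
  have hhead : d[t]? = some c := by
    rw [← List.head?_drop]
    rcases hpre with ⟨rest, hrest⟩
    rw [← hrest]; rfl
  have h1 : ¬ t < n := by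
    intro hlt
    have hf := hmin t hlt c hhead
    rw [hf] at hv
    exact absurd hv (by simp)
  have h2 : ¬ n < t := by
    intro hlt
    refine hfmin n hlt ?_
    refine pvSingleton_prefix ?_
    rw [List.head?_drop]
    exact hget
  have : t = n := by omega
  omega

-- every vowel's find points at a vowel position, hence lands at index ≥ the first vowel
theorem pvFind_ge_first (d : List Char) (n : Nat) (v : Char)
    (hmin : ∀ j < n, ∀ c', d[j]? = some c' → "AEIOU".toList.contains c' = false)
    (hvv : v ∈ "AEIOU".toList)
    (hne : PySem.Chars.find d [v] ≠ -1) :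
    (↑n : Int) ≤ PySem.Chars.find d [v] := by
  have hge := PySem.Chars.neg_one_le_find d [v]
  have hnn : 0 ≤ PySem.Chars.find d [v] := by omega
  obtain ⟨hpre, _⟩ := PySem.Chars.find_spec hnn
  set t := (PySem.Chars.find d [v]).toNat with htdef
  have hhead : d[t]? = some v := by
    rw [← List.head?_drop]
    rcases hpre with ⟨rest, hrest⟩
    rw [← hrest]; rfl
  by_contra hlt
  have htn : t < n := by omega
  have hvt : "AEIOU".toList.contains v = true := by
    rw [List.contains_iff_mem]
    exact hvv
  have hf := hmin t htn v hhead
  rw [hf] at hvt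
  exact absurd hvt (by simp)

-- core: one alphabet pass of B (per-vowel find from position k, then min) finds the first vowel at/after k
theorem pvNextVowel_eq (name : String) (k : Nat) (hk : k ≤ name.toList.length) :
    pvNextVowel name ↑k =
      if pvFirstIdx (name.toList.drop k) = -1 then -1
      else ↑k + pvFirstIdx (name.toList.drop k) := by
  set s := name.toList with hs
  set d := s.drop k with hd
  have hmapped : ("AEIOU".toList).map
      (fun v => PySem.Str.findFrom name (String.singleton v) ↑k) =
      ("AEIOU".toList).map
      (fun v => if PySem.Chars.find d [v] = -1 then -1 else ↑k + PySem.Chars.find d [v]) := by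
    refine List.map_congr_left (fun v _ => ?_)
    have h1 := PySem.Chars.findFrom_natCast s [v] k hk
    have h2 : (String.singleton v).toList = [v] := by simp
    rw [PySem.Str.findFrom_eq, h2, ← hs, h1, ← hd]
  simp only [pvNextVowel]
  rw [hmapped]
  by_cases hfi : pvFirstIdx d = -1
  · -- no vowel in d: every find is -1, hits is empty
    have hall : ∀ c ∈ d, "AEIOU".toList.contains c = false :=
      (pvFirstIdx_eq_neg_one_iff d).mp hfi
    have hnil : (("AEIOU".toList).map
        (fun v => if PySem.Chars.find d [v] = -1 then -1 else ↑k + PySem.Chars.find d [v])).filter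
        (fun p => p != (-1 : Int)) = [] := by
      rw [List.filter_eq_nil_iff]
      intro x hx
      obtain ⟨v, hvmem, hvx⟩ := List.mem_map.mp hx
      have hfneg : PySem.Chars.find d [v] = -1 := by
        rw [PySem.Chars.find_eq_neg_one_iff]
        intro hinf
        have hvd : v ∈ d := (List.singleton_infix_iff v d).mp hinf
        have hvt : "AEIOU".toList.contains v = true := by
          rw [List.contains_iff_mem]; exact hvmem
        have := hall v hvd
        rw [this] at hvt
        exact absurd hvt (by simp)
      simp [← hvx, hfneg]
    rw [hnil]
    have hnone : PySem.List.min? ([] : List Int) (fun x => x) = none :=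
      (PySem.List.min?_eq_none_iff _ _).mpr rfl
    rw [hnone]
    dsimp only
    rw [if_pos hfi]
  · obtain ⟨n, hn, ⟨c, hget, hv⟩, hmin⟩ := pvFirstIdx_spec d hfi
    set hits := (("AEIOU".toList).map
        (fun v => if PySem.Chars.find d [v] = -1 then -1 else ↑k + PySem.Chars.find d [v])).filter
        (fun p => p != (-1 : Int)) with hhits
    have hcv : c ∈ "AEIOU".toList := by
      rw [← List.contains_iff_mem]; exact hv
    have hfc : PySem.Chars.find d [c] = ↑n := pvFind_at_first d n c hget hmin hv
    have hkn_mem : (↑k + ↑n : Int) ∈ hits := by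
      rw [hhits, List.mem_filter]
      refine ⟨List.mem_map.mpr ⟨c, hcv, by simp [hfc]⟩, by simp; omega⟩
    have hlb : ∀ x ∈ hits, (↑k + ↑n : Int) ≤ x := by
      intro x hx
      rw [hhits, List.mem_filter] at hx
      obtain ⟨hxm, hxne⟩ := hx
      obtain ⟨v, hvmem, hvx⟩ := List.mem_map.mp hxm
      by_cases hfv : PySem.Chars.find d [v] = -1
      · rw [if_pos hfv] at hvx
        rw [← hvx] at hxne
        simp at hxne
      · have := pvFind_ge_first d n v hmin hvmem hfv
        rw [if_neg hfv] at hvx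
        omega
    rcases hmq : PySem.List.min? hits (fun x => x) with _ | m
    · rw [PySem.List.min?_eq_none_iff] at hmq
      rw [hmq] at hkn_mem
      simp at hkn_mem
    · have hm1 : m ∈ hits := PySem.List.min?_mem hmq
      have hm2 : m ≤ ↑k + ↑n := PySem.List.min?_isMin hmq _ hkn_mem
      have hm3 : (↑k + ↑n : Int) ≤ m := hlb m hm1
      dsimp only
      rw [if_neg hfi, hn]
      omega

-- A side: pvF/pvS describe A's scan with 1 resp. 0 vowels already counted
def pvF : List Char → Nat → Int
  | [], _ => -1
  | c :: t, k => if "AEIOU".toList.contains c then (k : Int) else pvF t (k + 1)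

def pvS : List Char → Nat → Int
  | [], _ => -1
  | c :: t, k => if "AEIOU".toList.contains c then pvF t (k + 1) else pvS t (k + 1)

theorem pvGoA_eq (s : List Char) : ∀ k : Nat,
    pvGoA (PySem.List.enumerate s ↑k) 1 = pvF s k ∧
    pvGoA (PySem.List.enumerate s ↑k) 0 = pvS s k := by
  induction s with
  | nil => intro k; simp [PySem.List.enumerate, pvGoA, pvF, pvS]
  | cons c t ih =>
    intro k
    have hcast : (↑k + 1 : Int) = ↑(k + 1) := by push_cast; ring
    constructor
    · by_cases hc : "AEIOU".toList.contains c = true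
      · simp only [PySem.List.enumerate, pvGoA, pvF, hc, if_true]
        rfl
      · have hcf : "AEIOU".toList.contains c = false := by
          cases hb : "AEIOU".toList.contains c
          · rfl
          · exact absurd hb hc
        simp only [PySem.List.enumerate, pvGoA, pvF, hcf, Bool.false_eq_true, if_false, hcast]
        exact (ih (k + 1)).1
    · by_cases hc : "AEIOU".toList.contains c = true
      · simp only [PySem.List.enumerate, pvGoA, pvS, hc, if_true, hcast]
        norm_num
        exact (ih (k + 1)).1
      · have hcf : "AEIOU".toList.contains c = false := by
          cases hb : "AEIOU".toList.contains c
          · rfl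
          · exact absurd hb hc
        simp only [PySem.List.enumerate, pvGoA, pvS, hcf, Bool.false_eq_true, if_false, hcast]
        exact (ih (k + 1)).2

theorem pvF_eq (s : List Char) : ∀ k : Nat,
    pvF s k = if pvFirstIdx s = -1 then -1 else ↑k + pvFirstIdx s := by
  induction s with
  | nil => intro k; simp [pvF, pvFirstIdx]
  | cons c t ih =>
    intro k
    have hge := pvNegOneLe_firstIdx t
    by_cases hc : "AEIOU".toList.contains c = true
    · simp only [pvF, pvFirstIdx, hc, if_true]
      norm_num
    · have hcf : "AEIOU".toList.contains c = false := by
        cases hb : "AEIOU".toList.contains c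
        · rfl
        · exact absurd hb hc
      simp only [pvF, pvFirstIdx, hcf, Bool.false_eq_true, if_false, ih (k + 1)]
      split_ifs with h1 h2 <;> push_cast <;> omega

theorem pvS_eq (s : List Char) : ∀ k : Nat,
    pvS s k = if pvFirstIdx s = -1 then -1
      else pvF (s.drop ((pvFirstIdx s).toNat + 1)) (k + (pvFirstIdx s).toNat + 1) := by
  induction s with
  | nil => intro k; simp [pvS, pvFirstIdx]
  | cons c t ih =>
    intro k
    have hge := pvNegOneLe_firstIdx t
    by_cases hc : "AEIOU".toList.contains c = true
    · simp only [pvS, pvFirstIdx, hc, if_true]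
      norm_num
    · have hcf : "AEIOU".toList.contains c = false := by
        cases hb : "AEIOU".toList.contains c
        · rfl
        · exact absurd hb hc
      simp only [pvS, pvFirstIdx, hcf, Bool.false_eq_true, if_false, ih (k + 1)]
      by_cases ht : pvFirstIdx t = -1
      · simp [ht]
      · have h0 : 0 ≤ pvFirstIdx t := by omega
        have hne : ¬ (pvFirstIdx t + 1 = -1) := by omega
        have htn : (pvFirstIdx t + 1).toNat = (pvFirstIdx t).toNat + 1 := by omega
        simp only [if_neg ht]
        rw [if_neg hne, htn]
        have hdrop : (c :: t).drop ((pvFirstIdx t).toNat + 1 + 1) = t.drop ((pvFirstIdx t).toNat + 1) := by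
          simp
        rw [hdrop]
        congr 1
        omega

theorem pvFirstIdx_lt_length (d : List Char) (h : pvFirstIdx d ≠ -1) :
    (pvFirstIdx d).toNat < d.length := by
  obtain ⟨n, hn, ⟨c, hget, _⟩, _⟩ := pvFirstIdx_spec d h
  obtain ⟨hlt, _⟩ := List.getElem?_eq_some_iff.mp hget
  rw [hn]
  simpa using hlt

-- ===== VERDICT =====
theorem find_2nd_vowel_index_spec : Claim_equal_find_2nd_vowel_index := by
  intro name _
  unfold Spec_find_2nd_vowel_index find_2nd_vowel_index find_2nd_vowel_index_alt
  set s := name.toList with hs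
  have hA : pvGoA (PySem.List.enumerate s 0) 0 = pvS s 0 := by
    have := (pvGoA_eq s 0).2
    simpa using this
  rw [hA, pvS_eq s 0]
  have h0 : pvNextVowel name 0 = if pvFirstIdx s = -1 then -1 else 0 + pvFirstIdx s := by
    have := pvNextVowel_eq name 0 (by omega)
    simpa [hs] using this
  by_cases hfi : pvFirstIdx s = -1
  · have hfirst : pvNextVowel name 0 = -1 := by rw [h0, if_pos hfi]
    simp [hfi, hfirst]
  · have hge := pvNegOneLe_firstIdx s
    have hpos : 0 ≤ pvFirstIdx s := by omega
    set n := (pvFirstIdx s).toNat with hn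
    have hval : pvFirstIdx s = ↑n := by omega
    have hfirst : pvNextVowel name 0 = ↑n := by rw [h0, if_neg hfi]; omega
    have hneq : ((↑n : Int) == (-1 : Int)) = false := by
      simp only [beq_eq_false_iff_ne, ne_eq]
      omega
    simp only [hfirst, hneq, Bool.false_eq_true, if_false, if_neg hfi]
    have hlen : n + 1 ≤ s.length := pvFirstIdx_lt_length s hfi
    have hnext := pvNextVowel_eq name (n + 1) (by simpa [hs] using hlen)
    have hcast : ((↑n : Int) + 1) = ↑(n + 1) := by push_cast; ring
    rw [hcast, hnext, pvF_eq, ← hs]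
    split_ifs with h1
    · rfl
    · push_cast; ring
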